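-- pv_equiv track=rewrite | github.com/jongwow/algorithm | baekjoon/18808.py | attachSticker
-- ===== SOURCE A (Python) =====
-- def attachSticker(big, small, sY, sX):
--     stickerWidth = len(small[0])
--     stickerHeight = len(small)
--     cnt = 0
--     for y in range(stickerHeight):
--         for x in range(stickerWidth):
--             if small[y][x] == 1:
--                 cnt += 1
--                 big[sY+y][sX+x] = 1
--     return cnt
-- ===== SOURCE B (Python) =====
-- def attachSticker(big, small, sY, sX):
--     w = len(small[0])
--     total = 0
--     for dy, row in enumerate(small):
--         prefix = row[:w]
--         cnt = prefix.count(1)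
--         pos = 0
--         for _ in range(cnt):
--             pos = prefix.index(1, pos)
--             big[sY + dy][sX + pos] = 1
--             pos += 1
--         total += cnt
--     return total
-- ===== Notes on version B (the rewrite author's own statement) =====
-- stated objective: alternative
-- what changed: Instead of A's fused per-cell nested scan that tests each cell and increments a counter, B counts per row with the count(1) builtin on the row slice and marks by jumping between 1-positions with repeated index(1, pos), never testing non-1 cells itself.
import Mathlib
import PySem

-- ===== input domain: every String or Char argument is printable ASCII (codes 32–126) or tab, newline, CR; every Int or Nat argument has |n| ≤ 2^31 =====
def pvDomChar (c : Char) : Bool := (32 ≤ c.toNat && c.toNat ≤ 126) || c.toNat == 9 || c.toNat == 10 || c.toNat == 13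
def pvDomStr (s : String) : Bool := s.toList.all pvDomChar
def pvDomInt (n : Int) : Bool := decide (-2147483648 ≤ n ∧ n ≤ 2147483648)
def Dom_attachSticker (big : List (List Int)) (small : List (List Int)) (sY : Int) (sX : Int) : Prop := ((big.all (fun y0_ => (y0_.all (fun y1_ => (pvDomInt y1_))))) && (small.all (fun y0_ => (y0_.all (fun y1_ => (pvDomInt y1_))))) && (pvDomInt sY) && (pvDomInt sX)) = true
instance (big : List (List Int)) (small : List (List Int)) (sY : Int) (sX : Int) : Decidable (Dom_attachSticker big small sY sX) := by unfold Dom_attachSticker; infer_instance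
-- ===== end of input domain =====

-- B replaces A's per-cell nested test-and-count scan by a per-row count(1) on the row slice, marking via
-- repeated index(1, pos); the equivalence proved is about the RETURN value only (both Pythons perform the
-- same in-place marking of `big`, which is not modelled in the ports; the return value never reads `big`).

-- ===== PORT A =====
-- literal port of A's fused nested loop: cnt accumulated while scanning every cell; the write
-- big[sY+y][sX+x] = 1 mutates big only (in range by Pre_) and is not modelled.
def attachSticker (big : List (List Int)) (small : List (List Int)) (sY : Int) (sX : Int) : Int :=
  let stickerWidth := (small.headD []).length
  let stickerHeight := small.length
  (List.range stickerHeight).foldl (fun cnt y =>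
    (List.range stickerWidth).foldl (fun cnt x =>
      if (small.getD y []).getD x 0 = 1 then cnt + 1 else cnt) cnt) 0

-- ===== PORT B =====
-- port of Source B's return value: fold over the rows themselves, adding prefix.count(1) of each row's
-- slice row[:w]; Source B's marking loop (index(1, pos) jumps) mutates big only and is not modelled.
def attachSticker_alt (big : List (List Int)) (small : List (List Int)) (sY : Int) (sX : Int) : Int :=
  let w := (small.headD []).length
  small.foldl (fun total row =>
    total + (((PySem.List.slice row none (some (w : Int))).count 1 : Nat) : Int)) 0

-- ===== PRECONDITION & SPEC =====
-- Pre_ excludes exactly the inputs on which the Python A raises: empty small (IndexError at small[0]),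
-- a row of small shorter than row 0 (IndexError reading small[y][x]), and 1-cells whose write target
-- big[sY+y][sX+x] is out of Python's (negative-wrapping) index range (IndexError on the write).
def Pre_attachSticker (big : List (List Int)) (small : List (List Int)) (sY : Int) (sX : Int) : Prop :=
  small ≠ [] ∧
  (∀ row ∈ small, (small.headD []).length ≤ row.length) ∧
  (∀ y < small.length, ∀ x < (small.headD []).length,
    (small.getD y []).getD x 0 = 1 →
      PySem.Raise.InRange big.length (sY + y) ∧
      PySem.Raise.InRange ((PySem.List.pyGet? big (sY + y)).getD []).length (sX + x))
instance (big : List (List Int)) (small : List (List Int)) (sY : Int) (sX : Int) : Decidable (Pre_attachSticker big small sY sX) := by unfold Pre_attachSticker; infer_instance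

def pvWitness_attachSticker : List (List Int) × List (List Int) × Int × Int := ([[0, 0], [0, 0]], [[1, 0], [0, 1]], 0, 0)

def Spec_attachSticker (big : List (List Int)) (small : List (List Int)) (sY : Int) (sX : Int) (out : Int) : Prop := out = attachSticker_alt big small sY sX
instance (big : List (List Int)) (small : List (List Int)) (sY : Int) (sX : Int) (out : Int) : Decidable (Spec_attachSticker big small sY sX out) := by unfold Spec_attachSticker; infer_instance

-- ===== CLAIM (what is proved, stated in full; the proofs are below) =====
def Claim_equal_attachSticker : Prop := ∀ (big : List (List Int)) (small : List (List Int)) (sY : Int) (sX : Int), Dom_attachSticker big small sY sX → Pre_attachSticker big small sY sX → Spec_attachSticker big small sY sX (attachSticker big small sY sX)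

-- ===== LEMMAS AND PROOFS =====

-- A's inner per-cell counting scan over x < w counts exactly the 1s of the row prefix row.take w
lemma countP_range_getD (row : List Int) (w : Nat) :
    (List.range w).countP (fun x => decide (row.getD x 0 = 1)) = (row.take w).count 1 := by
  induction w with
  | zero => simp
  | succ w ih =>
    rw [List.range_succ, List.countP_append, ih]
    by_cases h : w < row.length
    · rw [List.take_succ, List.getElem?_eq_getElem h, List.count_append]
      simp only [List.getD, List.getElem?_eq_getElem h, Option.getD_some, Option.toList_some,
        List.countP_singleton, List.count_singleton]
      by_cases hv : row[w] = 1
      · simp [hv]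
      · simp [hv]
    · have hle : row.length ≤ w := Nat.le_of_not_lt h
      rw [List.take_of_length_le hle, List.take_of_length_le (Nat.le_succ_of_le hle)]
      simp [List.getD, List.getElem?_eq_none_iff.mpr hle]

-- A's outer index loop over range (length small) equals B's fold over the rows themselves
lemma outer_fold (l : List (List Int)) (w : Nat) (c : Int) :
    (List.range l.length).foldl (fun cnt y =>
      (List.range w).foldl (fun cnt x =>
        if (l.getD y []).getD x 0 = 1 then cnt + 1 else cnt) cnt) c
    = l.foldl (fun t row => t + (((row.take w).count 1 : Nat) : Int)) c := by
  induction l generalizing c with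
  | nil => simp
  | cons row rs ih =>
    rw [List.length_cons, List.range_succ_eq_map, List.foldl_cons, List.foldl_map]
    simp only [List.getD_cons_zero, List.getD_cons_succ]
    rw [PySem.List.foldl_ite_add_one, countP_range_getD, ih, List.foldl_cons]

-- ===== VERDICT (by name: the statement is the Claim_ definition above) =====
theorem attachSticker_spec : Claim_equal_attachSticker := by
  intro big small sY sX _ _
  show _ = _
  simp only [attachSticker, attachSticker_alt, PySem.List.slice_to_natCast]
  exact outer_fold small (small.headD []).length 0
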